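-- pv_equiv track=rewrite | github.com/rrajput22/project-6d-rrajput22 | row_puzzle.py | row_puzzle
-- ===== SOURCE A (Python) =====
-- def row_puzzle(row, current_index=0, visited_set=None):
--     """
--     Recursive function to check if the row puzzle is solvable.
--     """
--     # Initializes visited set if not provided, memoization so that the function does not revisit the same index
--     if visited_set is None:
--         visited_set = set()
--
--     # Base case: If the token reaches the rightmost square
--     # as long as the token reaches the rightmost square, zeros in other squares are allowed
--     if current_index == len(row) - 1:
--         return True
--
--     # Check if the current index is already visited
--     if current_index in visited_set:
--         return False
--
--     # Adds the current index to visited set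
--     visited_set.add(current_index)
--
--     # Moves right or left based on the value in the current square
--     move_right = current_index + row[current_index]
--     move_left = current_index - row[current_index]
--
--     # Recursive calls for both directions
--     if 0 <= move_right < len(row) and row_puzzle(row, move_right, visited_set):
--         return True
--     if 0 <= move_left < len(row) and row_puzzle(row, move_left, visited_set):
--         return True
--
--     # If neither direction leads to a solution, return False
--     return False
-- ===== SOURCE B (Python) =====
-- def row_puzzle(row, current_index=0, visited_set=None):
--     """
--     Iterative (explicit-stack DFS) check whether the token can reach the
--     rightmost square. Same return value and same mutation of a caller-supplied
--     visited_set as the recursive version.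
--     """
--     if visited_set is None:
--         visited_set = set()
--     stack = [current_index]
--     while stack:
--         node = stack.pop()
--         if node == len(row) - 1:
--             return True
--         if node in visited_set:
--             continue
--         visited_set.add(node)
--         value = row[node]
--         move_left = node - value
--         move_right = node + value
--         if 0 <= move_left < len(row):
--             stack.append(move_left)
--         if 0 <= move_right < len(row):
--             stack.append(move_right)
--     return False
-- ===== Notes on version B (the rewrite author's own statement) =====
-- stated objective: alternative
-- what changed: Replaces the recursive DFS with an explicit-stack iterative DFS (while-loop popping nodes, pushing left then right so right is explored first), removing recursion entirely.
import Mathlib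
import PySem

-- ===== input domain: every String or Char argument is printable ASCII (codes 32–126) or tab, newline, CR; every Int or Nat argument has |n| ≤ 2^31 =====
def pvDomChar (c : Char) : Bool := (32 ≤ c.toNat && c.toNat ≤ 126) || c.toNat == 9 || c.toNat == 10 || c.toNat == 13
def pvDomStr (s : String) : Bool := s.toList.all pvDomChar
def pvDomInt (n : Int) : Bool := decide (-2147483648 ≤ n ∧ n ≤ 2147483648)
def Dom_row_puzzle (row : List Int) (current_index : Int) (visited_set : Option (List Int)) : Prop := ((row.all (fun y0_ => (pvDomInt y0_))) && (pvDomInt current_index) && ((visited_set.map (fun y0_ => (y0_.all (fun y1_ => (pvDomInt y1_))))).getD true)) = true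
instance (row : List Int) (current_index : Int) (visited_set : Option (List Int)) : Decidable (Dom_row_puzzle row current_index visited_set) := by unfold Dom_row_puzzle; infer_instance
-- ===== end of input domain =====

-- B replaces A's recursive DFS by an explicit-stack iterative DFS (same return value;
-- both Pythons mutate a caller-supplied visited_set identically — the proof is about the return value).

-- termination measure: number of indices in [-len, len) not yet in the visited set
def pvMu (n : Nat) (v : PySem.Set Int) : Nat :=
  ((Finset.range (2 * n)).filter (fun k : Nat => ((k : Int) - (n : Int)) ∉ v)).card

theorem pv_not_mem_of_contains_false {v : PySem.Set Int} {i : Int}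
    (h : ¬ v.contains i = true) : i ∉ v :=
  fun hm => h (by simpa [PySem.Set.contains_iff] using hm)

theorem pv_bounds_of_pyGet? {row : List Int} {i x : Int}
    (h : PySem.List.pyGet? row i = some x) :
    -(row.length : Int) ≤ i ∧ i < (row.length : Int) := by
  have hin : ¬ PySem.List.pyGet? row i = none := by rw [h]; simp
  rw [PySem.List.pyGet?_eq_none_iff, PySem.Raise.InRange] at hin
  push Not at hin
  omega

theorem pvMu_mono {n : Nat} {v w : PySem.Set Int} (h : ∀ j, j ∈ v → j ∈ w) :
    pvMu n w ≤ pvMu n v := by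
  apply Finset.card_le_card
  intro k hk
  simp only [Finset.mem_filter] at hk ⊢
  exact ⟨hk.1, fun hm => hk.2 (h _ hm)⟩

theorem pvMu_lt {n : Nat} {v : PySem.Set Int} {i : Int}
    (h1 : -(n : Int) ≤ i) (h2 : i < (n : Int)) (h3 : i ∉ v) :
    pvMu n (PySem.Set.add v i) < pvMu n v := by
  apply Finset.card_lt_card
  constructor
  · intro k hk
    simp only [Finset.mem_filter, PySem.Set.mem_add] at hk ⊢
    exact ⟨hk.1, fun hm => hk.2 (Or.inl hm)⟩
  · intro hsub
    have hk : (i + n).toNat ∈ (Finset.range (2 * n)).filter (fun k : Nat => ((k : Int) - (n : Int)) ∉ v) := by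
      simp only [Finset.mem_filter, Finset.mem_range]
      constructor
      · omega
      · have : ((i + n).toNat : Int) - (n : Int) = i := by omega
        rw [this]; exact h3
    have hk2 := hsub hk
    simp only [Finset.mem_filter, PySem.Set.mem_add] at hk2
    have : ((i + n).toNat : Int) - (n : Int) = i := by omega
    rw [this] at hk2
    exact hk2.2 (Or.inr rfl)

-- ===== PORT A =====
-- recursive DFS; returns (result, visited) and carries the proof that visited only grows
-- (needed for termination); raising row[current_index] (IndexError) is modelled as pyGet? = none
def rowPuzzleGo (row : List Int) (i : Int) (v : PySem.Set Int) :
    { p : Bool × PySem.Set Int // ∀ j, j ∈ v → j ∈ p.2 } :=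
  if i = (row.length : Int) - 1 then ⟨(true, v), fun _ h => h⟩
  else if v.contains i then ⟨(false, v), fun _ h => h⟩
  else
    match h : PySem.List.pyGet? row i with
    | none => ⟨(false, PySem.Set.add v i), fun j hj => (PySem.Set.mem_add _ _ _).2 (Or.inl hj)⟩
    | some x =>
      let mr := i + x
      let ml := i - x
      let r1 : { p : Bool × PySem.Set Int // ∀ j, j ∈ PySem.Set.add v i → j ∈ p.2 } :=
        if 0 ≤ mr ∧ mr < (row.length : Int) then rowPuzzleGo row mr (PySem.Set.add v i)
        else ⟨(false, PySem.Set.add v i), fun _ h => h⟩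
      if r1.val.1 then ⟨(true, r1.val.2), fun j hj => r1.2 j ((PySem.Set.mem_add _ _ _).2 (Or.inl hj))⟩
      else
        let r2 : { p : Bool × PySem.Set Int // ∀ j, j ∈ r1.val.2 → j ∈ p.2 } :=
          if 0 ≤ ml ∧ ml < (row.length : Int) then rowPuzzleGo row ml r1.val.2
          else ⟨(false, r1.val.2), fun _ h => h⟩
        ⟨(r2.val.1, r2.val.2), fun j hj => r2.2 j (r1.2 j ((PySem.Set.mem_add _ _ _).2 (Or.inl hj)))⟩
termination_by pvMu row.length v
decreasing_by
  · have hb := pv_bounds_of_pyGet? h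
    have hnm : i ∉ v := pv_not_mem_of_contains_false (by assumption)
    exact pvMu_lt hb.1 hb.2 hnm
  · have hb := pv_bounds_of_pyGet? h
    have hnm : i ∉ v := pv_not_mem_of_contains_false (by assumption)
    calc pvMu row.length r1.val.2 ≤ pvMu row.length (PySem.Set.add v i) := pvMu_mono r1.2
      _ < pvMu row.length v := pvMu_lt hb.1 hb.2 hnm

def row_puzzle (row : List Int) (current_index : Int) (visited_set : Option (List Int)) : Bool :=
  (rowPuzzleGo row current_index
    (match visited_set with
     | none => PySem.Set.empty
     | some l => PySem.Set.ofList l)).val.1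

-- ===== PORT B =====
-- explicit-stack DFS loop: pop a node, check goal / visited, push left then right successor
def rowPuzzleLoop (row : List Int) (stack : List Int) (v : PySem.Set Int) : Bool :=
  match stack with
  | [] => false
  | i :: rest =>
    if i = (row.length : Int) - 1 then true
    else if v.contains i then rowPuzzleLoop row rest v
    else
      match h : PySem.List.pyGet? row i with
      | none => false  -- IndexError in Python (excluded by Pre_)
      | some x =>
        let ml := i - x
        let mr := i + x
        let s1 := if 0 ≤ ml ∧ ml < (row.length : Int) then ml :: rest else rest
        let s2 := if 0 ≤ mr ∧ mr < (row.length : Int) then mr :: s1 else s1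
        rowPuzzleLoop row s2 (PySem.Set.add v i)
termination_by (pvMu row.length v, stack.length)
decreasing_by
  · apply Prod.Lex.right
    simp
  · apply Prod.Lex.left
    have hb := pv_bounds_of_pyGet? h
    have hnm : i ∉ v := pv_not_mem_of_contains_false (by assumption)
    exact pvMu_lt hb.1 hb.2 hnm

def row_puzzle_alt (row : List Int) (current_index : Int) (visited_set : Option (List Int)) : Bool :=
  rowPuzzleLoop row [current_index]
    (match visited_set with
     | none => PySem.Set.empty
     | some l => PySem.Set.ofList l)

-- ===== PRECONDITION & SPEC =====
-- Pre_ excludes exactly the inputs where Python A raises IndexError: a start index out of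
-- range [-len, len) that is neither equal to len-1 nor already in the visited set.
def Pre_row_puzzle (row : List Int) (current_index : Int) (visited_set : Option (List Int)) : Prop :=
  current_index = (row.length : Int) - 1 ∨ current_index ∈ visited_set.getD [] ∨
    (-(row.length : Int) ≤ current_index ∧ current_index < (row.length : Int))
instance (row : List Int) (current_index : Int) (visited_set : Option (List Int)) : Decidable (Pre_row_puzzle row current_index visited_set) := by unfold Pre_row_puzzle; infer_instance

def pvWitness_row_puzzle : List Int × Int × Option (List Int) := ([1, 2, 1, 0], 0, none)

def Spec_row_puzzle (row : List Int) (current_index : Int) (visited_set : Option (List Int)) (out : Bool) : Prop := out = row_puzzle_alt row current_index visited_set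
instance (row : List Int) (current_index : Int) (visited_set : Option (List Int)) (out : Bool) : Decidable (Spec_row_puzzle row current_index visited_set out) := by unfold Spec_row_puzzle; infer_instance

-- ===== CLAIM (what is proved, stated in full; the proofs are below) =====
def Claim_equal_row_puzzle : Prop := ∀ (row : List Int) (current_index : Int) (visited_set : Option (List Int)), Dom_row_puzzle row current_index visited_set → Pre_row_puzzle row current_index visited_set → Spec_row_puzzle row current_index visited_set (row_puzzle row current_index visited_set)

-- ===== LEMMAS AND PROOFS =====

theorem pv_val_ite {c : Prop} [Decidable c] {α : Type} {p : α → Prop} (a b : Subtype p) :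
    ((if c then a else b : Subtype p) : α) = if c then (a : α) else (b : α) := by
  split <;> rfl

-- one-step equations for the two ports
theorem go_base (row : List Int) (i : Int) (v : PySem.Set Int)
    (h : i = (row.length : Int) - 1) : (rowPuzzleGo row i v).val = (true, v) := by
  rw [rowPuzzleGo]; simp [h]

theorem go_visited (row : List Int) (i : Int) (v : PySem.Set Int)
    (h1 : ¬ i = (row.length : Int) - 1) (h2 : v.contains i = true) :
    (rowPuzzleGo row i v).val = (false, v) := by
  have h2' : i ∈ v := (PySem.Set.contains_iff v i).1 h2
  rw [rowPuzzleGo]; simp [h1, h2']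

theorem go_none (row : List Int) (i : Int) (v : PySem.Set Int)
    (h1 : ¬ i = (row.length : Int) - 1) (h2 : v.contains i = false)
    (h3 : PySem.List.pyGet? row i = none) :
    (rowPuzzleGo row i v).val = (false, PySem.Set.add v i) := by
  rw [rowPuzzleGo]; simp only [if_neg h1]
  split
  · simp_all
  · split
    · rfl
    · rename_i x' heq
      rw [heq] at h3
      simp at h3

theorem go_step (row : List Int) (i x : Int) (v : PySem.Set Int)
    (h1 : ¬ i = (row.length : Int) - 1) (h2 : v.contains i = false)
    (h3 : PySem.List.pyGet? row i = some x) :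
    (rowPuzzleGo row i v).val =
      (let r1 := if 0 ≤ i + x ∧ i + x < (row.length : Int)
                 then (rowPuzzleGo row (i + x) (PySem.Set.add v i)).val
                 else (false, PySem.Set.add v i)
       if r1.1 then (true, r1.2)
       else
         let r2 := if 0 ≤ i - x ∧ i - x < (row.length : Int)
                   then (rowPuzzleGo row (i - x) r1.2).val
                   else (false, r1.2)
         (r2.1, r2.2)) := by
  rw [rowPuzzleGo]; simp only [if_neg h1]
  split
  · simp_all
  · split
    · rename_i heq
      rw [heq] at h3
      simp at h3
    · rename_i x' heq
      rw [h3] at heq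
      cases heq
      simp [pv_val_ite]
      rw [pv_val_ite]

theorem loop_nil (row : List Int) (v : PySem.Set Int) : rowPuzzleLoop row [] v = false := by
  rw [rowPuzzleLoop]

theorem loop_base (row : List Int) (i : Int) (rest : List Int) (v : PySem.Set Int)
    (h : i = (row.length : Int) - 1) : rowPuzzleLoop row (i :: rest) v = true := by
  rw [rowPuzzleLoop]; simp [h]

theorem loop_visited (row : List Int) (i : Int) (rest : List Int) (v : PySem.Set Int)
    (h1 : ¬ i = (row.length : Int) - 1) (h2 : v.contains i = true) :
    rowPuzzleLoop row (i :: rest) v = rowPuzzleLoop row rest v := by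
  have h2' : i ∈ v := (PySem.Set.contains_iff v i).1 h2
  rw [rowPuzzleLoop]; simp [h1, h2']

theorem loop_none (row : List Int) (i : Int) (rest : List Int) (v : PySem.Set Int)
    (h1 : ¬ i = (row.length : Int) - 1) (h2 : v.contains i = false)
    (h3 : PySem.List.pyGet? row i = none) :
    rowPuzzleLoop row (i :: rest) v = false := by
  rw [rowPuzzleLoop]; simp only [if_neg h1]
  split
  · simp_all
  · split
    · rfl
    · rename_i x' heq
      rw [heq] at h3
      simp at h3

theorem loop_step (row : List Int) (i x : Int) (rest : List Int) (v : PySem.Set Int)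
    (h1 : ¬ i = (row.length : Int) - 1) (h2 : v.contains i = false)
    (h3 : PySem.List.pyGet? row i = some x) :
    rowPuzzleLoop row (i :: rest) v =
      rowPuzzleLoop row
        (if 0 ≤ i + x ∧ i + x < (row.length : Int)
         then (i + x) :: (if 0 ≤ i - x ∧ i - x < (row.length : Int) then (i - x) :: rest else rest)
         else (if 0 ≤ i - x ∧ i - x < (row.length : Int) then (i - x) :: rest else rest))
        (PySem.Set.add v i) := by
  rw [rowPuzzleLoop]; simp only [if_neg h1]
  split
  · simp_all
  · split
    · rename_i heq
      rw [heq] at h3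
      simp at h3
    · rename_i x' heq
      rw [h3] at heq
      cases heq
      rfl

-- key simulation lemma: one popped node of the stack loop behaves like one recursive call
theorem loop_eq_go (row : List Int) :
    ∀ (m : Nat) (i : Int) (rest : List Int) (v : PySem.Set Int),
      3 * pvMu row.length v + (i :: rest).length ≤ m →
      (∀ j, j ∈ i :: rest → -(row.length : Int) ≤ j ∧ j < (row.length : Int)) →
      rowPuzzleLoop row (i :: rest) v =
        (if (rowPuzzleGo row i v).val.1 then true
         else rowPuzzleLoop row rest (rowPuzzleGo row i v).val.2) := by
  intro m
  induction m using Nat.strong_induction_on with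
  | _ m IH =>
    intro i rest v hm hH
    by_cases h1 : i = (row.length : Int) - 1
    · rw [loop_base row i rest v h1, go_base row i v h1]
      simp
    · cases hc : PySem.Set.contains v i with
      | true =>
        rw [loop_visited row i rest v h1 hc, go_visited row i v h1 hc]
        simp
      | false =>
        have hbi := hH i (by simp)
        cases hg : PySem.List.pyGet? row i with
        | none =>
          exfalso
          rw [PySem.List.pyGet?_eq_none_iff, PySem.Raise.InRange] at hg
          omega
        | some x =>
          have hnm : i ∉ v := pv_not_mem_of_contains_false (by rw [hc]; simp)
          have hmu : pvMu row.length (PySem.Set.add v i) < pvMu row.length v :=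
            pvMu_lt hbi.1 hbi.2 hnm
          have hmlen : (i :: rest).length = rest.length + 1 := by simp
          rw [hmlen] at hm
          rw [loop_step row i x rest v h1 hc hg, go_step row i x v h1 hc hg]
          by_cases hmr : 0 ≤ i + x ∧ i + x < (row.length : Int) <;>
            by_cases hml : 0 ≤ i - x ∧ i - x < (row.length : Int)
          · -- right and left both in bounds
            simp only [if_pos hmr, if_pos hml]
            rw [IH (m - 1) (by omega) (i + x) ((i - x) :: rest) (PySem.Set.add v i)
                (by simp; omega)
                (by intro j hj; simp only [List.mem_cons] at hj
                    rcases hj with rfl | rfl | hj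
                    · omega
                    · omega
                    · exact hH j (by simp [hj]))]
            have hmono1 := pvMu_mono (n := row.length) (rowPuzzleGo row (i + x) (PySem.Set.add v i)).2
            cases hG1 : (rowPuzzleGo row (i + x) (PySem.Set.add v i)).val.1 with
            | true => simp [hG1]
            | false =>
              simp only [hG1, Bool.false_eq_true, if_false, ite_false]
              rw [IH (m - 1) (by omega) (i - x) rest
                  ((rowPuzzleGo row (i + x) (PySem.Set.add v i)).val.2)
                  (by simp; omega)
                  (by intro j hj; simp only [List.mem_cons] at hj
                      rcases hj with rfl | hj
                      · omega
                      · exact hH j (by simp [hj]))]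
              rw [if_pos hmr]
          · -- only right in bounds
            simp only [if_pos hmr, if_neg hml]
            rw [IH (m - 1) (by omega) (i + x) rest (PySem.Set.add v i)
                (by simp; omega)
                (by intro j hj; simp only [List.mem_cons] at hj
                    rcases hj with rfl | hj
                    · omega
                    · exact hH j (by simp [hj]))]
            cases hG1 : (rowPuzzleGo row (i + x) (PySem.Set.add v i)).val.1 <;> simp [hG1]
          · -- only left in bounds
            simp only [if_neg hmr, if_pos hml]
            rw [IH (m - 1) (by omega) (i - x) rest (PySem.Set.add v i)
                (by simp; omega)
                (by intro j hj; simp only [List.mem_cons] at hj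
                    rcases hj with rfl | hj
                    · omega
                    · exact hH j (by simp [hj]))]
            rw [if_neg hmr]
            simp
          · -- neither in bounds
            simp only [if_neg hmr, if_neg hml]
            simp

-- the single-seed case used by the final theorem
theorem go_eq_loop_single (row : List Int) (i : Int) (w : PySem.Set Int) :
    (rowPuzzleGo row i w).val.1 = rowPuzzleLoop row [i] w := by
  by_cases hb : -(row.length : Int) ≤ i ∧ i < (row.length : Int)
  · rw [loop_eq_go row (3 * pvMu row.length w + 1) i [] w (by simp)
        (by intro j hj; simp only [List.mem_cons, List.not_mem_nil, or_false] at hj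
            subst hj; exact hb)]
    cases hG : (rowPuzzleGo row i w).val.1 <;> simp [hG, loop_nil]
  · by_cases h1 : i = (row.length : Int) - 1
    · rw [go_base row i w h1, loop_base row i [] w h1]
    · cases hc : PySem.Set.contains w i with
      | true => rw [go_visited row i w h1 hc, loop_visited row i [] w h1 hc, loop_nil]
      | false =>
        have hg : PySem.List.pyGet? row i = none := by
          rw [PySem.List.pyGet?_eq_none_iff, PySem.Raise.InRange]
          omega
        rw [go_none row i w h1 hc hg, loop_none row i [] w h1 hc hg]

-- ===== VERDICT (by name: the statement is the Claim_ definition above) =====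
theorem row_puzzle_spec : Claim_equal_row_puzzle := by
  intro row ci vs _hDom _hPre
  show row_puzzle row ci vs = row_puzzle_alt row ci vs
  cases vs with
  | none => exact go_eq_loop_single row ci PySem.Set.empty
  | some l => exact go_eq_loop_single row ci (PySem.Set.ofList l)
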